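-- pv_equiv track=rewrite | github.com/arshackerofficial/CSCI-120 | classwork/day9.py | rotations
-- ===== SOURCE A (Python) =====
-- def rotations(arr):
--     current_rotations = 0
--     if len(arr) == 0:
--         return current_rotations
--     if arr[0] > arr[-1]:
--         arr.pop(0)
--         current_rotations = 1 + rotations(arr)
--     else:
--         return -1
--     return current_rotations
-- ===== SOURCE B (Python) =====
-- def rotations(arr):
--     # Note: A mutates arr in place (pops from the front); B does not:
--     # Equivalence claimed is about the return value only.
--     if len(arr) == 0:
--         return 0
--     last = arr[-1]
--     count = 0
--     for x in arr:
--         if x > last: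
--             count += 1
--         else:
--             break
--     return count - 1
-- ===== Notes on version B (the rewrite author's own statement) =====
-- stated objective: simpler
-- what changed: Replaced the recursion with repeated pop(0) by a single iterative scan counting prefix elements greater than the last element, returning count-1 (0 for empty input).
import Mathlib
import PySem

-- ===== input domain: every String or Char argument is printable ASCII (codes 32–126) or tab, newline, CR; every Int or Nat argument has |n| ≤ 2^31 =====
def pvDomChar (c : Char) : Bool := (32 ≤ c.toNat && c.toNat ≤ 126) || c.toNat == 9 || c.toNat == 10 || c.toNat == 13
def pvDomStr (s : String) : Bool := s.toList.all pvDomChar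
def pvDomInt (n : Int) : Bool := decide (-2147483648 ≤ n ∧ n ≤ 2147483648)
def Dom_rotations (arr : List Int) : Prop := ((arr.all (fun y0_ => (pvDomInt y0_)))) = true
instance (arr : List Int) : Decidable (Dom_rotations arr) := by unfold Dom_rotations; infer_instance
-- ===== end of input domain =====

-- ===== PORT A =====
-- B replaces A's recursion with repeated pop(0) by a single iterative prefix scan (simpler); return-value equivalence only (A mutates its argument).
-- arr[-1] of the nonempty list a :: rest is rest.getLastD a
def rotations (arr : List Int) : Int :=
  match arr with
  | [] => 0
  | a :: rest =>
      if a > rest.getLastD a then 1 + rotations rest else -1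

-- ===== PORT B =====
-- the for-loop with break: count prefix elements > last
def countPrefix (last : Int) : List Int → Int
  | [] => 0
  | x :: xs => if x > last then 1 + countPrefix last xs else 0

def rotations_alt (arr : List Int) : Int :=
  match arr with
  | [] => 0
  | a :: rest => countPrefix (rest.getLastD a) (a :: rest) - 1

-- ===== PRECONDITION & SPEC =====
def Spec_rotations (arr : List Int) (out : Int) : Prop := out = rotations_alt arr
instance (arr : List Int) (out : Int) : Decidable (Spec_rotations arr out) := by unfold Spec_rotations; infer_instance

-- ===== CLAIM (what is proved, stated in full; the proofs are below) =====
def Claim_equal_rotations : Prop := ∀ (arr : List Int), Dom_rotations arr → Spec_rotations arr (rotations arr)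

-- ===== LEMMAS AND PROOFS =====

-- ===== VERDICT (by name: the statement is the Claim_ definition above) =====
theorem rotations_key : ∀ (rest : List Int) (a : Int),
    rotations (a :: rest) = countPrefix (rest.getLastD a) (a :: rest) - 1 := by
  intro rest
  induction rest with
  | nil =>
      intro a
      simp [rotations, countPrefix]
  | cons b rs ih =>
      intro a
      by_cases h : a > (b :: rs).getLastD a
      · have hl : (b :: rs).getLastD a = rs.getLastD b := by cases rs <;> rfl
        simp only [rotations, countPrefix, hl] at *
        simp only [if_pos h]
        rw [ih b]
        omega
      · simp only [rotations, countPrefix]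
        simp only [if_neg h]
        omega

theorem rotations_spec : Claim_equal_rotations := by
  intro arr _
  unfold Spec_rotations rotations_alt
  cases arr with
  | nil => simp [rotations]
  | cons a rest => exact rotations_key rest a
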